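-- pv_equiv track=rewrite | github.com/it-is-wanthefull/LInCodeList | 프로그래머스/3/12987. 숫자 게임/숫자 게임.py | solution
-- ===== SOURCE A (Python) =====
-- def solution(A, B):
--     A.sort(); B.sort()
--     idx_a, idx_b, score = 0, 0, 0
--
--     while idx_a < len(A) and idx_b < len(B):
--         if A[idx_a] < B[idx_b]:
--             score += 1
--             idx_a += 1
--             idx_b += 1
--         else:
--             idx_b += 1
--
--     return score
-- ===== SOURCE B (Python) =====
-- def solution(A, B):
--     A.sort(); B.sort()
--     score = 0
--     for b in B:
--         # rank of b in A = number of elements of A below b, by binary search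
--         lo, hi = 0, len(A)
--         while lo < hi:
--             mid = (lo + hi) // 2
--             if A[mid] < b:
--                 lo = mid + 1
--             else:
--                 hi = mid
--         if lo > score:
--             score += 1
--     return score
-- ===== Notes on version B (the rewrite author's own statement) =====
-- stated objective: alternative
-- what changed: Replaces the two-pointer walk over sorted A with a rank test: for each b in sorted B a binary search finds how many elements of A are below b, and b is taken exactly when that rank exceeds the matches made so far; no running index into A is kept.
import Mathlib
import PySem

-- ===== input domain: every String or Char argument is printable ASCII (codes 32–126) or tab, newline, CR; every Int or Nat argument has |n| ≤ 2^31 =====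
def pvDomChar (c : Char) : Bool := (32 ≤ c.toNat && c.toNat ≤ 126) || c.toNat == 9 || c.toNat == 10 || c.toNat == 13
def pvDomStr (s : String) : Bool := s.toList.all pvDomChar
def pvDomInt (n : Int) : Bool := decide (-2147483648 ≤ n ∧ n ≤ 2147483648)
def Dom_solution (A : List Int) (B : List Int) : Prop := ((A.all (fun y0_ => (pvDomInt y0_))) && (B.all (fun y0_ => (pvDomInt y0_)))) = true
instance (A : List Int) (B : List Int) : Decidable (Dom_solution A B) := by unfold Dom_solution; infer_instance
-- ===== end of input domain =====

-- B replaces A's two-pointer walk by, for each b of sorted B, a count of A-elements below b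
-- compared with the score so far (alternative algorithm, not faster). Both sort A and B in place.


-- ===== PORT A =====
-- the while loop: recursion on the remaining part of sorted B (idx_b advances every step)
def solLoopA (sA : List Int) : List Int → Nat → Int → Int
  | [], _, score => score
  | b :: rest, ia, score =>
    if ia < sA.length then
      if sA.getD ia 0 < b then solLoopA sA rest (ia + 1) (score + 1)
      else solLoopA sA rest ia score
    else score

def solution (A : List Int) (B : List Int) : Int :=
  solLoopA (PySem.List.sorted A (fun x => x) false) (PySem.List.sorted B (fun x => x) false) 0 0

-- ===== PORT B =====
-- the inner while loop: bisect-left binary search for b over sA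
def bis (sA : List Int) (b : Int) (lo hi : Nat) : Nat :=
  if h : lo < hi then
    let mid := (lo + hi) / 2
    if sA.getD mid 0 < b then bis sA b (mid + 1) hi else bis sA b lo mid
  else lo
termination_by hi - lo
decreasing_by all_goals omega

def altStep (sA : List Int) (score : Int) (b : Int) : Int :=
  if (bis sA b 0 sA.length : Int) > score then score + 1 else score

def solution_alt (A : List Int) (B : List Int) : Int :=
  (PySem.List.sorted B (fun x => x) false).foldl
    (altStep (PySem.List.sorted A (fun x => x) false)) 0

-- ===== PRECONDITION & SPEC =====
def Spec_solution (A : List Int) (B : List Int) (out : Int) : Prop := out = solution_alt A B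
instance (A : List Int) (B : List Int) (out : Int) : Decidable (Spec_solution A B out) := by unfold Spec_solution; infer_instance

-- ===== CLAIM (what is proved, stated in full; the proofs are below) =====
def Claim_equal_solution : Prop := ∀ (A : List Int) (B : List Int), Dom_solution A B → Spec_solution A B (solution A B)

-- ===== LEMMAS AND PROOFS =====

-- On a nondecreasing list, "the s-th element exists and is < b" is exactly "more than s elements are < b".
theorem rank_lemma (sA : List Int) (h : sA.Pairwise (· ≤ ·)) (s : Nat) (b : Int) :
    (s < sA.length ∧ sA.getD s 0 < b) ↔ s < sA.countP (fun a => decide (a < b)) := by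
  induction sA generalizing s with
  | nil => simp
  | cons a t ih =>
    rcases List.pairwise_cons.mp h with ⟨ha, ht⟩
    cases s with
    | zero =>
      simp only [List.countP_cons, List.getD_cons_zero, List.length_cons]
      constructor
      · rintro ⟨-, hab⟩
        simp [hab]
      · intro hc
        refine ⟨by omega, ?_⟩
        by_contra hnab
        have h0 : t.countP (fun a => decide (a < b)) = 0 := by
          rw [List.countP_eq_zero]
          intro x hx
          have := ha x hx
          simp only [decide_eq_true_eq] at *
          omega
        simp [hnab, h0] at hc
    | succ s =>
      simp only [List.countP_cons, List.getD_cons_succ, List.length_cons]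
      by_cases hab : a < b
      · rw [show (s + 1 < t.length + 1 ↔ s < t.length) from by omega]
        rw [ih ht s]
        simp [hab]
      · have h0 : t.countP (fun a => decide (a < b)) = 0 := by
          rw [List.countP_eq_zero]
          intro x hx
          have := ha x hx
          simp only [decide_eq_true_eq]
          omega
        simp only [h0, hab]
        constructor
        · rintro ⟨hs, hlt⟩
          exfalso
          have hs' : s < t.length := by omega
          have hmem : t.getD s 0 ∈ t := by
            rw [List.getD_eq_getElem _ _ hs']
            exact List.getElem_mem hs'
          have := ha _ hmem
          omega
        · intro hc; simp at hc
  
-- getD is monotone on a nondecreasing list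
theorem getD_mono (sA : List Int) (h : sA.Pairwise (· ≤ ·)) {k m : Nat}
    (hkm : k ≤ m) (hm : m < sA.length) : sA.getD k 0 ≤ sA.getD m 0 := by
  rcases Nat.eq_or_lt_of_le hkm with rfl | hlt
  · exact le_refl _
  · rw [List.getD_eq_getElem _ _ (by omega), List.getD_eq_getElem _ _ hm]
    exact List.pairwise_iff_getElem.mp h k m (by omega) hm hlt

-- the binary search computes the count of elements below b
theorem bis_eq_countP_aux (sA : List Int) (h : sA.Pairwise (· ≤ ·)) (b : Int)
    (lo hi : Nat) (hlohi : lo ≤ hi) (hhi : hi ≤ sA.length)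
    (hlow : ∀ k, k < lo → sA.getD k 0 < b)
    (hhigh : ∀ k, hi ≤ k → k < sA.length → ¬ sA.getD k 0 < b) :
    bis sA b lo hi = sA.countP (fun a => decide (a < b)) := by
  rw [bis]
  split
  · next hlt =>
    by_cases hmid : sA.getD ((lo + hi) / 2) 0 < b
    · simp only [hmid, if_pos]
      exact bis_eq_countP_aux sA h b ((lo + hi) / 2 + 1) hi (by omega) hhi
        (fun k hk => lt_of_le_of_lt (getD_mono sA h (by omega) (by omega)) hmid)
        hhigh
    · simp only [hmid, ite_false]
      exact bis_eq_countP_aux sA h b lo ((lo + hi) / 2) (by omega) (by omega)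
        hlow
        (fun k hk hklen hkb =>
          hmid (lt_of_le_of_lt (getD_mono sA h hk hklen) hkb))
  · next hge =>
    have hlohi' : lo = hi := by omega
    subst hlohi'
    -- lo separates: k < lo are < b, k ≥ lo are ≥ b; compare with countP via rank_lemma
    have hle : lo ≤ sA.countP (fun a => decide (a < b)) := by
      by_contra hc
      replace hc : sA.countP (fun a => decide (a < b)) < lo := by omega
      have := (rank_lemma sA h (sA.countP (fun a => decide (a < b))) b).1
        ⟨by
          have := List.countP_le_length (l := sA) (p := fun a => decide (a < b))
          omega, hlow _ hc⟩
      omega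
    have hge' : sA.countP (fun a => decide (a < b)) ≤ lo := by
      by_contra hc
      replace hc : lo < sA.countP (fun a => decide (a < b)) := by omega
      have hr := (rank_lemma sA h lo b).2 hc
      exact hhigh lo (le_refl _) hr.1 hr.2
    omega
termination_by hi - lo
decreasing_by all_goals omega

theorem bis_eq_countP (sA : List Int) (h : sA.Pairwise (· ≤ ·)) (b : Int) :
    bis sA b 0 sA.length = sA.countP (fun a => decide (a < b)) :=
  bis_eq_countP_aux sA h b 0 sA.length (Nat.zero_le _) (le_refl _)
    (by omega) (fun k hk hk' => absurd hk' (by omega))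

-- once A is exhausted the fold never increments: every count is ≤ |A| ≤ score
theorem fold_const (sA rest : List Int) (hs : sA.Pairwise (· ≤ ·)) (score : Int)
    (h : (sA.length : Int) ≤ score) :
    rest.foldl (altStep sA) score = score := by
  induction rest with
  | nil => rfl
  | cons b rest ih =>
    have hc : ((sA.countP (fun a => decide (a < b)) : Nat) : Int) ≤ score := by
      have := List.countP_le_length (l := sA) (p := fun a => decide (a < b))
      omega
    simp only [List.foldl_cons, altStep, bis_eq_countP sA hs]
    rw [if_neg (by omega)]
    exact ih

theorem loop_eq (rest : List Int) (sA : List Int) (h : sA.Pairwise (· ≤ ·)) :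
    ∀ (ia : Nat) (score : Int), score = (ia : Int) →
      solLoopA sA rest ia score = rest.foldl (altStep sA) score := by
  induction rest with
  | nil => intro ia score _; rfl
  | cons b rest ih =>
    intro ia score hsc
    by_cases hlen : ia < sA.length
    · by_cases hlt : sA.getD ia 0 < b
      · have hcount : ia < sA.countP (fun a => decide (a < b)) :=
          (rank_lemma sA h ia b).mp ⟨hlen, hlt⟩
        simp only [solLoopA, if_pos hlen, if_pos hlt, List.foldl_cons, altStep,
          bis_eq_countP sA h]
        rw [if_pos (by omega)]
        rw [ih (ia + 1) (score + 1) (by omega)]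
      · have hcount : ¬ ia < sA.countP (fun a => decide (a < b)) := by
          intro hc
          exact hlt ((rank_lemma sA h ia b).mpr hc).2
        simp only [solLoopA, if_pos hlen, if_neg hlt, List.foldl_cons, altStep,
          bis_eq_countP sA h]
        rw [if_neg (by omega)]
        exact ih ia score hsc
    · simp only [solLoopA, if_neg hlen]
      rw [fold_const sA (b :: rest) h score (by omega)]

-- ===== VERDICT (by name: the statement is the Claim_ definition above) =====
theorem solution_spec : Claim_equal_solution := by
  intro A B _
  unfold Spec_solution solution solution_alt
  exact loop_eq _ _ (PySem.List.sorted_pairwise A (fun x => x) ) 0 0 rfl
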